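-- pv_equiv track=rewrite | github.com/shree-elamathi/python-programs | geeksforgeeks/Valid_strings.py | valid_strins
-- ===== SOURCE A (Python) =====
-- def valid_strins(n,k,arr):
--     vow=["a","e","i","o","u"]
--     count=0
--     for word in arr:
--         ans=[]
--         for i in word:
--             if i in vow:
--                 ans.append(i)
--         if len(ans)==k:
--             count=count+1
--     return count
--
-- k=2
--
-- arr=["aei","ae"]
-- ===== SOURCE B (Python) =====
-- def valid_strins(n, k, arr):
--     def vowel_total(word):
--         return sum(sum(1 for c in word if c == v) for v in "aeiou")
--     return sum(1 for word in arr if vowel_total(word) == k)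
-- ===== Notes on version B (the rewrite author's own statement) =====
-- stated objective: alternative
-- what changed: Instead of building a list of a word's vowels character by character and comparing its length to k, B computes each word's vowel total by iterating over the five vowels and counting occurrences of each, and tallies qualifying words with a counting comprehension instead of an explicit accumulator loop.
import Mathlib
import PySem

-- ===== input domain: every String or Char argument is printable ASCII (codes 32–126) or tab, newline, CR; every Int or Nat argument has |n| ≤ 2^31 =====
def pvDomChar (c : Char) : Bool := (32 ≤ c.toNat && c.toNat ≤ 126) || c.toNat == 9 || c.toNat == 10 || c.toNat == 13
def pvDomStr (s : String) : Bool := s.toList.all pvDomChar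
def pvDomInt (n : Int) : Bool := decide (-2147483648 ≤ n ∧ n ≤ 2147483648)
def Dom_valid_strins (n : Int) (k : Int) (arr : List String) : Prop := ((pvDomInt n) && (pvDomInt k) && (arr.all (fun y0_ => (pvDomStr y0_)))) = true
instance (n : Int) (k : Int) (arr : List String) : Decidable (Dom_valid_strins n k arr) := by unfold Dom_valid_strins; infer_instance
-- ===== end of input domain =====

-- B replaces A's per-character vowel-list building with a per-vowel occurrence count; objective: alternative decomposition, same cost.
-- ===== PORT A =====
def valid_strins (n : Int) (k : Int) (arr : List String) : Int :=
  let vow : List Char := ['a', 'e', 'i', 'o', 'u']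
  arr.foldl (fun count word =>
    let ans := word.toList.foldl (fun ans i => if vow.contains i then ans ++ [i] else ans) []
    if (ans.length : Int) = k then count + 1 else count) 0

-- ===== PORT B =====
def vowelTotal (word : String) : Int :=
  ("aeiou".toList.map (fun v => (word.toList.count v : Int))).sum

def valid_strins_alt (n : Int) (k : Int) (arr : List String) : Int :=
  (arr.countP (fun word => vowelTotal word == k) : Int)

-- ===== PRECONDITION & SPEC =====
def Spec_valid_strins (n : Int) (k : Int) (arr : List String) (out : Int) : Prop := out = valid_strins_alt n k arr
instance (n : Int) (k : Int) (arr : List String) (out : Int) : Decidable (Spec_valid_strins n k arr out) := by unfold Spec_valid_strins; infer_instance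

-- ===== CLAIM (what is proved, stated in full; the proofs are below) =====
def Claim_equal_valid_strins : Prop := ∀ (n : Int) (k : Int) (arr : List String), Dom_valid_strins n k arr → Spec_valid_strins n k arr (valid_strins n k arr)

-- ===== LEMMAS AND PROOFS =====

-- ===== VERDICT (by name: the statement is the Claim_ definition above) =====
lemma vowel_filter_len_eq_sum (cs : List Char) :
    (((cs.filter (fun c => (['a', 'e', 'i', 'o', 'u'] : List Char).contains c)).length : Int))
      = ("aeiou".toList.map (fun v => (cs.count v : Int))).sum := by
  induction cs with
  | nil => decide
  | cons c cs ih =>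
    show (((c :: cs).filter (fun c => (['a','e','i','o','u'] : List Char).contains c)).length : Int)
      = (['a','e','i','o','u'].map (fun v => (((c :: cs).count v : Nat) : Int))).sum
    simp only [List.filter_cons, List.count_cons, List.map_cons, List.map_nil,
      List.sum_cons, List.sum_nil] at *
    by_cases ha : c = 'a' <;> by_cases he : c = 'e' <;> by_cases hi : c = 'i' <;>
      by_cases ho : c = 'o' <;> by_cases hu : c = 'u' <;>
      simp_all <;> omega

theorem valid_strins_spec : Claim_equal_valid_strins := by
  intro n k arr _
  unfold Spec_valid_strins valid_strins valid_strins_alt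
  dsimp only
  rw [show (0 : Int) = 0 + 0 from rfl]
  simp only [PySem.List.foldl_ite_add_one]
  rw [zero_add, zero_add]
  congr 1
  apply List.countP_congr
  intro word _
  rw [PySem.List.foldl_append_if (fun i => (['a','e','i','o','u'] : List Char).contains i) (fun i => i)]
  simp only [List.nil_append, List.map_id']
  rw [vowel_filter_len_eq_sum]
  unfold vowelTotal
  simp [beq_iff_eq]
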